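-- pv_equiv track=rewrite | github.com/YannMartinDes/Python | Reseaux/tp1_q_vide.py | MLT_3
-- ===== SOURCE A (Python) =====
-- def MLT_3(Bit_list):
--     x = [i for i in range(len(Bit_list))]
--     y = []
--
--     #m pour montant , d pour descendant.
--     sens = "m"
--     val = 0
--
--     for el in Bit_list :
--         if el == '1' :
--             if sens == "m" :
--                 if val == 1:
--                     sens = "d"
--                     val = 0
--                 else :
--                     val = 1
--             else :
--                 if val == -1:
--                     sens = "m"
--                     val = 0
--                 else :
--                     val = -1
--         y.append(val)
--
--     return x,y
-- ===== SOURCE B (Python) =====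
-- LEVELS = [0, 1, 0, -1]
--
-- def MLT_3(Bit_list):
--     x = list(range(len(Bit_list)))
--     y = []
--     k = 0
--     for el in Bit_list:
--         if el == '1':
--             k += 1
--         y.append(LEVELS[k % 4])
--     return x, y
-- ===== Notes on version B (the rewrite author's own statement) =====
-- stated objective: simpler
-- what changed: Replaces A's (sens,val) two-variable state machine with nested branches by a single count-of-ones counter and a fixed 4-entry level table indexed by the count mod 4.
import Mathlib
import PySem

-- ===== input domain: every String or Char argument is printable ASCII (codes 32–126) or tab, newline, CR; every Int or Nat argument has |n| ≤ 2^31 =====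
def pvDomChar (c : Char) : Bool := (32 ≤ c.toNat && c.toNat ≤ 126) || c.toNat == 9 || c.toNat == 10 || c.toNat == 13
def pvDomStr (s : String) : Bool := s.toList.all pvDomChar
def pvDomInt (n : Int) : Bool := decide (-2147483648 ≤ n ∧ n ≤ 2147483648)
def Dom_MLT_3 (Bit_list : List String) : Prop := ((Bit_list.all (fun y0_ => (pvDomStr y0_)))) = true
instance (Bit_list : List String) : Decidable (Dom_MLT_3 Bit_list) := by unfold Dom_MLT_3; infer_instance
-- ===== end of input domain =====

-- B replaces A's (sens,val) state machine with a count-of-ones mod 4 and a fixed level table; same output, simpler.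


-- ===== PORT A =====
-- one loop iteration of A: update (sens, val), append the new val
def mltStepA (st : (String × Int) × List Int) (el : String) : (String × Int) × List Int :=
  let s' :=
    if el == "1" then
      if st.1.1 == "m" then
        if st.1.2 == 1 then ("d", (0 : Int)) else ("m", 1)
      else
        if st.1.2 == -1 then ("m", (0 : Int)) else ("d", -1)
    else st.1
  (s', st.2 ++ [s'.2])

def MLT_3 (Bit_list : List String) : List Int × List Int :=
  let x := PySem.List.pyRange 0 (Bit_list.length : Int) 1
  let r := Bit_list.foldl mltStepA (("m", 0), [])
  (x, r.2)

-- ===== PORT B =====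
def mltLevels : List Int := [0, 1, 0, -1]

-- one loop iteration of B: bump the ones-counter on '1', append LEVELS[k % 4]
-- (k ≥ 0 throughout, so k % 4 ∈ {0,1,2,3} and the lookup never misses; the .getD 0 is unreachable)
def mltStepB (st : Int × List Int) (el : String) : Int × List Int :=
  let k := if el == "1" then st.1 + 1 else st.1
  (k, st.2 ++ [(PySem.List.pyGet? mltLevels (PySem.Int.mod k 4)).getD 0])

def MLT_3_alt (Bit_list : List String) : List Int × List Int :=
  let x := PySem.List.pyRange 0 (Bit_list.length : Int) 1
  let r := Bit_list.foldl mltStepB (0, [])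
  (x, r.2)

-- ===== PRECONDITION & SPEC =====
def Spec_MLT_3 (Bit_list : List String) (out : List Int × List Int) : Prop := out = MLT_3_alt Bit_list
instance (Bit_list : List String) (out : List Int × List Int) : Decidable (Spec_MLT_3 Bit_list out) := by unfold Spec_MLT_3; infer_instance

-- ===== CLAIM (what is proved, stated in full; the proofs are below) =====
def Claim_equal_MLT_3 : Prop := ∀ (Bit_list : List String), Dom_MLT_3 Bit_list → Spec_MLT_3 Bit_list (MLT_3 Bit_list)

-- ===== LEMMAS AND PROOFS =====

-- A's (sens, val) state determined by the ones-count mod 4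
def mltStateOf (m : Int) : String × Int :=
  if m = 1 then ("m", 1) else if m = 2 then ("d", 0) else if m = 3 then ("d", -1) else ("m", 0)

lemma mlt_mod_cases (k : Int) (_hk : 0 ≤ k) :
    PySem.Int.mod k 4 = k % 4 ∧ (k % 4 = 0 ∨ k % 4 = 1 ∨ k % 4 = 2 ∨ k % 4 = 3) := by
  refine ⟨PySem.Int.mod_eq_emod_of_pos (by norm_num), by omega⟩

-- a '1' step from state stateOf(k % 4) lands in state stateOf((k+1) % 4)
lemma mlt_state_step (k : Int) (hk : 0 ≤ k) :
    (mltStepA (mltStateOf (PySem.Int.mod k 4), []) "1").1 = mltStateOf (PySem.Int.mod (k + 1) 4) := by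
  obtain ⟨h1, h2⟩ := mlt_mod_cases k hk
  obtain ⟨h1', _⟩ := mlt_mod_cases (k + 1) (by omega)
  rw [h1, h1']
  rcases h2 with h | h | h | h
  · have h' : (k + 1) % 4 = 1 := by omega
    rw [h, h']; decide
  · have h' : (k + 1) % 4 = 2 := by omega
    rw [h, h']; decide
  · have h' : (k + 1) % 4 = 3 := by omega
    rw [h, h']; decide
  · have h' : (k + 1) % 4 = 0 := by omega
    rw [h, h']; decide

-- the val A appends equals B's table entry at the same count
lemma mlt_val_level (k : Int) (hk : 0 ≤ k) :
    (mltStateOf (PySem.Int.mod k 4)).2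
      = (PySem.List.pyGet? mltLevels (PySem.Int.mod k 4)).getD 0 := by
  obtain ⟨h1, h2⟩ := mlt_mod_cases k hk
  rw [h1]
  rcases h2 with h | h | h | h <;> rw [h] <;> decide

lemma mlt_stepA_one (s : String × Int) (acc : List Int) :
    mltStepA (s, acc) "1" = ((mltStepA (s, []) "1").1, acc ++ [(mltStepA (s, []) "1").1.2]) := rfl

lemma mlt_fold_eq (bl : List String) :
    ∀ (k : Int), 0 ≤ k → ∀ (acc : List Int),
      (bl.foldl mltStepA (mltStateOf (PySem.Int.mod k 4), acc)).2
        = (bl.foldl mltStepB (k, acc)).2 := by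
  induction bl with
  | nil => intro k hk acc; rfl
  | cons el bl ih =>
      intro k hk acc
      rw [List.foldl_cons, List.foldl_cons]
      by_cases hel : el = "1"
      · subst hel
        have hB : mltStepB (k, acc) "1"
            = (k + 1, acc ++ [(PySem.List.pyGet? mltLevels (PySem.Int.mod (k + 1) 4)).getD 0]) := by
          simp [mltStepB]
        rw [mlt_stepA_one, mlt_state_step k hk, mlt_val_level (k + 1) (by omega), hB]
        exact ih (k + 1) (by omega) _
      · have hel' : (el == "1") = false := by simpa using hel
        have hA : mltStepA (mltStateOf (PySem.Int.mod k 4), acc) el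
            = (mltStateOf (PySem.Int.mod k 4), acc ++ [(mltStateOf (PySem.Int.mod k 4)).2]) := by
          simp [mltStepA, hel']
        have hB : mltStepB (k, acc) el
            = (k, acc ++ [(PySem.List.pyGet? mltLevels (PySem.Int.mod k 4)).getD 0]) := by
          simp [mltStepB, hel']
        rw [hA, mlt_val_level k hk, hB]
        exact ih k hk _

-- ===== VERDICT (by name: the statement is the Claim_ definition above) =====
theorem MLT_3_spec : Claim_equal_MLT_3 := by
  intro bl _
  unfold Spec_MLT_3 MLT_3 MLT_3_alt
  have h0 : mltStateOf (PySem.Int.mod 0 4) = ("m", 0) := by decide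
  have h := mlt_fold_eq bl 0 (by norm_num) []
  rw [h0] at h
  exact congrArg (Prod.mk _) h
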